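-- pv_equiv track=rewrite | github.com/itswillis/practice | Lab 13 Recursion/Q9.py | get_lucas_count
-- ===== SOURCE A (Python) =====
-- def get_lucas_count(n):
--     if n == 1:
--         return (2, 0)
--     if n == 2:
--         return (1, 0)
--
--     previous_1, count_1 = get_lucas_count(n-1)
--     previous_2, count_2 = get_lucas_count(n-2)
--
--
--     value = previous_1 + previous_2
--
--
--     count = count_1 + count_2 + 2
--
--     return (value, count)
-- ===== SOURCE B (Python) =====
-- def get_lucas_count(n):
--     if n == 1:
--         return (2, 0)
--     a, b = 2, 1
--     ca, cb = 0, 0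
--     for _ in range(n - 2):
--         a, b, ca, cb = b, a + b, cb, ca + cb + 2
--     return (b, cb)
-- ===== Notes on version B (the rewrite author's own statement) =====
-- stated objective: faster
-- what changed: Replaced the naive double recursion (which recomputes subproblems exponentially) by a single bottom-up loop maintaining two consecutive Lucas values and their operation counts.
import Mathlib
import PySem

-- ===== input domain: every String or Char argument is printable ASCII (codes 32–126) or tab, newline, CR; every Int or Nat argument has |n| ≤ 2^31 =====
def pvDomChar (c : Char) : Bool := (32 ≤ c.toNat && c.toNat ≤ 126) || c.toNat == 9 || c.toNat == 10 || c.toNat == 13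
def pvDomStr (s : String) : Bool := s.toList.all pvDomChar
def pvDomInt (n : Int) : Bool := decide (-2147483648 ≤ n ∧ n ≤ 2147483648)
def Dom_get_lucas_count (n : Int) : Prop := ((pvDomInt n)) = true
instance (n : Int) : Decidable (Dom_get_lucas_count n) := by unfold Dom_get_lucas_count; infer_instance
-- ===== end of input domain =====

-- B replaces A's exponential double recursion by one bottom-up O(n) loop over two linear recurrences.


-- ===== PORT A =====
-- Literal port of A's double recursion; on n ≤ 0 Python recurses forever (outside Pre_),
-- the `else []` branch is only the totality guard for those inputs.
def get_lucas_count (n : Int) : List Int :=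
  if n = 1 then [2, 0]
  else if n = 2 then [1, 0]
  else if 2 < n then
    let p1 := get_lucas_count (n - 1)
    let p2 := get_lucas_count (n - 2)
    [p1.headI + p2.headI, p1.getLastD 0 + p2.getLastD 0 + 2]
  else []
termination_by n.toNat
decreasing_by all_goals omega

-- ===== PORT B =====
-- Literal port of Source B: `for _ in range(n-2)` iterates max(n-2,0) = (n-2).toNat times.
def get_lucas_count_alt (n : Int) : List Int :=
  if n = 1 then [2, 0]
  else
    let s := (List.range (n - 2).toNat).foldl
      (fun (st : Int × Int × Int × Int) _ =>
        (st.2.1, st.1 + st.2.1, st.2.2.2, st.2.2.1 + st.2.2.2 + 2))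
      (2, 1, 0, 0)
    [s.2.1, s.2.2.2]

-- ===== PRECONDITION & SPEC =====
-- Pre_ excludes n ≤ 0, on which Python A never returns (infinite recursion / RecursionError).
def Pre_get_lucas_count (n : Int) : Prop := 1 ≤ n
instance (n : Int) : Decidable (Pre_get_lucas_count n) := by unfold Pre_get_lucas_count; infer_instance
def pvWitness_get_lucas_count : Int := 7
def Spec_get_lucas_count (n : Int) (out : List Int) : Prop := out = get_lucas_count_alt n
instance (n : Int) (out : List Int) : Decidable (Spec_get_lucas_count n out) := by unfold Spec_get_lucas_count; infer_instance

-- ===== CLAIM (what is proved, stated in full; the proofs are below) =====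
def Claim_equal_get_lucas_count : Prop := ∀ (n : Int), Dom_get_lucas_count n → Pre_get_lucas_count n → Spec_get_lucas_count n (get_lucas_count n)

-- ===== LEMMAS AND PROOFS =====

-- Reference recurrence: L k = (Lucas value, operation count) at Python argument k+1.
def L : Nat → Int × Int
  | 0 => (2, 0)
  | 1 => (1, 0)
  | k + 2 => ((L k).1 + (L (k + 1)).1, (L k).2 + (L (k + 1)).2 + 2)

lemma portA_eq_L : ∀ k : Nat, get_lucas_count ((k : Int) + 1) = [(L k).1, (L k).2] := by
  intro k
  induction k using Nat.strong_induction_on with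
  | _ k ih =>
    match k with
    | 0 => rw [get_lucas_count]; norm_num [L]
    | 1 => rw [get_lucas_count]; norm_num [L]
    | k + 2 =>
      rw [get_lucas_count]
      push_cast
      have h1 : ¬ ((k : Int) + 2 + 1 = 1) := by omega
      have h2 : ¬ ((k : Int) + 2 + 1 = 2) := by omega
      have h3 : (2 : Int) < (k : Int) + 2 + 1 := by omega
      rw [if_neg h1, if_neg h2, if_pos h3]
      have e1 : ((k : Int) + 2 + 1) - 1 = ((k + 1 : Nat) : Int) + 1 := by push_cast; ring
      have e2 : ((k : Int) + 2 + 1) - 2 = ((k : Nat) : Int) + 1 := by ring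
      rw [e1, e2, ih (k + 1) (by omega), ih k (by omega)]
      simp [L]
      constructor <;> ring

lemma fold_inv : ∀ (m k : Nat),
    (List.range m).foldl
      (fun (st : Int × Int × Int × Int) _ =>
        (st.2.1, st.1 + st.2.1, st.2.2.2, st.2.2.1 + st.2.2.2 + 2))
      ((L k).1, (L (k + 1)).1, (L k).2, (L (k + 1)).2)
    = ((L (k + m)).1, (L (k + m + 1)).1, (L (k + m)).2, (L (k + m + 1)).2) := by
  intro m
  induction m with
  | zero => intro k; simp
  | succ m ih =>
    intro k
    rw [List.range_succ, List.foldl_append, ih k]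
    show ((L (k + m + 1)).1, (L (k + m)).1 + (L (k + m + 1)).1,
          (L (k + m + 1)).2, (L (k + m)).2 + (L (k + m + 1)).2 + 2) = _
    have : k + (m + 1) + 1 = (k + m) + 2 := by omega
    rw [this]
    have : k + (m + 1) = k + m + 1 := by omega
    rw [this]
    simp [L]

lemma portB_eq_L : ∀ k : Nat, get_lucas_count_alt ((k : Int) + 1) = [(L k).1, (L k).2] := by
  intro k
  match k with
  | 0 => simp [get_lucas_count_alt, L]
  | k + 1 =>
    rw [get_lucas_count_alt]
    have h1 : ¬ (((k + 1 : Nat) : Int) + 1 = 1) := by omega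
    rw [if_neg h1]
    have e : ((((k + 1 : Nat) : Int) + 1) - 2).toNat = k := by omega
    rw [e]
    have h0 : ((L 0).1, (L 1).1, (L 0).2, (L 1).2) = ((2 : Int), (1 : Int), (0 : Int), (0 : Int)) := by
      simp [L]
    rw [← h0, fold_inv k 0]
    simp

-- ===== VERDICT (by name: the statement is the Claim_ definition above) =====
theorem get_lucas_count_spec : Claim_equal_get_lucas_count := by
  intro n _ hpre
  unfold Spec_get_lucas_count
  have hk : n = ((n - 1).toNat : Int) + 1 := by
    unfold Pre_get_lucas_count at hpre; omega
  rw [hk, portA_eq_L, portB_eq_L]
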